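-- pv_equiv track=rewrite | github.com/Mozes721/PythonCrashCourse | chapter_8/magicians.py | great_magician
-- ===== SOURCE A (Python) =====
-- def great_magician(magicians):
--     greatest_magicians = []
--
--     while magicians:
--         magician = magicians.pop()
--         greatest_ones = magician + ' Greates!'
--         greatest_magicians.append(greatest_ones)
--
--     for great in greatest_magicians:
--         magicians.append(great)
--     return magicians
-- ===== SOURCE B (Python) =====
-- def great_magician(magicians):
--     magicians.reverse()
--     for i in range(len(magicians)):
--         magicians[i] = magicians[i] + ' Greates!'
--     return magicians
-- ===== Notes on version B (the rewrite author's own statement) =====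
-- stated objective: simpler
-- what changed: Replaces A's pop-into-temp-list-then-append-back two-loop shuffle with an in-place reverse() followed by one indexed loop reassigning each slot; no auxiliary list is built.
import Mathlib
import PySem

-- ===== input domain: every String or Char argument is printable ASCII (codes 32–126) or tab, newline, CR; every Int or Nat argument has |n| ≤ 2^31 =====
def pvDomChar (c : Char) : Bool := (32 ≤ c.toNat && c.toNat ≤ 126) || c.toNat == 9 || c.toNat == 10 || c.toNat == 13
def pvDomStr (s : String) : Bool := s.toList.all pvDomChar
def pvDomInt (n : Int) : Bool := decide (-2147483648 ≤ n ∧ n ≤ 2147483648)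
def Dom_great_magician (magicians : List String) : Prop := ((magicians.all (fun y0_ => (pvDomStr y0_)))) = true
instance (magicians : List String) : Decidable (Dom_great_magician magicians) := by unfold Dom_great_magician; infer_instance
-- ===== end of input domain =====

-- B replaces A's pop-into-temp-list-then-append-back two-loop shuffle with an in-place
-- reverse plus one indexed reassignment loop (simpler). Both Pythons mutate the argument
-- list to the returned value; the equivalence proved here is about the return value.

-- ===== PORT A =====
-- while magicians: magician = magicians.pop(); greatest_magicians.append(magician + ' Greates!')
def greatA_loop (ms acc : List String) : List String :=
  if h : ms = [] then acc
  else
    let magician := ms.getLast h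
    greatA_loop ms.dropLast (acc ++ [magician ++ " Greates!"])
termination_by ms.length
decreasing_by
  simpa [List.length_dropLast] using Nat.sub_lt (List.length_pos_iff.mpr h) one_pos

def great_magician (magicians : List String) : List String :=
  -- after the while loop 'magicians' is empty; the for loop appends each greatest back
  (greatA_loop magicians []).foldl (fun m great => m ++ [great]) []

-- ===== PORT B =====
def great_magician_alt (magicians : List String) : List String :=
  let ms := magicians.reverse
  (PySem.List.pyRange 0 ms.length 1).foldl
    (fun l i => l.set i.toNat (PySem.List.pyGetD l i "" ++ " Greates!")) ms

-- ===== PRECONDITION & SPEC =====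
def Spec_great_magician (magicians : List String) (out : List String) : Prop := out = great_magician_alt magicians
instance (magicians : List String) (out : List String) : Decidable (Spec_great_magician magicians out) := by unfold Spec_great_magician; infer_instance

-- ===== CLAIM (what is proved, stated in full; the proofs are below) =====
def Claim_equal_great_magician : Prop := ∀ (magicians : List String), Dom_great_magician magicians → Spec_great_magician magicians (great_magician magicians)

-- ===== LEMMAS AND PROOFS =====

theorem greatA_loop_eq (ms acc : List String) :
    greatA_loop ms acc = acc ++ ms.reverse.map (· ++ " Greates!") := by
  induction ms using List.reverseRecOn generalizing acc with
  | nil => simp [greatA_loop]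
  | append_singleton l x ih =>
      rw [greatA_loop]
      simp [ih]

theorem foldl_append_singleton (xs init : List String) :
    xs.foldl (fun m great => m ++ [great]) init = init ++ xs := by
  induction xs generalizing init with
  | nil => simp
  | cons x xs ih => simp [List.foldl_cons, ih]

theorem setmap_loop (l : List String) (k : Nat) (hk : k ≤ l.length) :
    (PySem.List.pyRange k l.length 1).foldl
      (fun l i => l.set i.toNat (PySem.List.pyGetD l i "" ++ " Greates!")) l
    = l.take k ++ (l.drop k).map (· ++ " Greates!") := by
  by_cases h : k = l.length
  · subst h
    rw [PySem.List.pyRange_one_eq_nil (by omega)]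
    simp
  · have hlt : k < l.length := by omega
    rw [PySem.List.pyRange_one_cons (by exact_mod_cast hlt), List.foldl_cons]
    have hget : PySem.List.pyGetD l (k : Int) "" = l[k] :=
      PySem.List.pyGetD_eq_getElem l "" (by omega) (by exact_mod_cast hlt)
    have hset : l.set (k : Int).toNat (PySem.List.pyGetD l (k : Int) "" ++ " Greates!")
        = l.take k ++ (l[k] ++ " Greates!") :: l.drop (k + 1) := by
      rw [hget]
      simp [List.set_eq_take_append_cons_drop, hlt]
    rw [hset]
    have hlen : (l.take k ++ (l[k] ++ " Greates!") :: l.drop (k + 1)).length = l.length := by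
      simp [Nat.min_eq_left (le_of_lt hlt)]
      omega
    have hrange : ((k : Int) + 1) = ((k + 1 : Nat) : Int) := by push_cast; ring
    have ih := setmap_loop (l.take k ++ (l[k] ++ " Greates!") :: l.drop (k + 1)) (k + 1)
      (by rw [hlen]; omega)
    rw [hrange, ← hlen, ih]
    have hlt' : (l.take k).length = k := by simp [Nat.min_eq_left (le_of_lt hlt)]
    rw [List.take_append, List.drop_append, hlt']
    have hmapdrop : List.drop k (List.map (fun x => x ++ " Greates!") l)
        = (l[k] ++ " Greates!") :: List.drop (k + 1) (List.map (fun x => x ++ " Greates!") l) := by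
      rw [List.drop_eq_getElem_cons (by simpa using hlt)]
      simp
    simp [List.take_take, hmapdrop, List.drop_take]
termination_by l.length - k
decreasing_by simp_all; omega

-- ===== VERDICT (by name: the statement is the Claim_ definition above) =====
theorem great_magician_spec : Claim_equal_great_magician := by
  intro magicians _
  unfold Spec_great_magician great_magician great_magician_alt
  rw [greatA_loop_eq, foldl_append_singleton]
  have h := setmap_loop magicians.reverse 0 (Nat.zero_le _)
  simpa using h.symm
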